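-- pv_equiv track=rewrite | github.com/Togibu/contrib-art-patterns | diagonal/pattern.py | _generate_diagonal
-- ===== SOURCE A (Python) =====
-- def _generate_diagonal(
--     num_weeks: int,
--     width: int,
--     spacing: int,
--     direction: str,
-- ) -> list[list[bool]]:
--     """
--     Diagonal stripes.
--
--     direction "down-right" (\\): cell (r, c) filled if (c + r) % period < width.
--     direction "up-right" (/):    cell (r, c) filled if (c - r) % period < width.
--     """
--     grid = [[False] * num_weeks for _ in range(7)]
--     period = width + spacing
--
--     for r in range(7):
--         for c in range(num_weeks):
--             offset = (c + r) if direction == "down-right" else (c - r)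
--             if offset % period < width:
--                 grid[r][c] = True
--
--     return grid
-- ===== SOURCE B (Python) =====
-- def _generate_diagonal(
--     num_weeks: int,
--     width: int,
--     spacing: int,
--     direction: str,
-- ) -> list[list[bool]]:
--     if num_weeks <= 0:
--         return [[] for _ in range(7)]
--     period = width + spacing
--     # stripe profile along the diagonal offset axis: offsets c+r / c-r lie in [-6, num_weeks+6]
--     diag = [(i % period) < width for i in range(-6, num_weeks + 7)]
--     return [diag[6 + r : 6 + r + num_weeks] if direction == "down-right"
--             else diag[6 - r : 6 - r + num_weeks]
--             for r in range(7)]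
-- ===== Notes on version B (the rewrite author's own statement) =====
-- stated objective: faster
-- what changed: B precomputes the one-dimensional stripe profile along the diagonal-offset axis (offsets -6..num_weeks+6) once and emits each of the 7 rows as a slice of that profile, instead of A's per-cell modular test with in-place mutation of a preallocated grid.
import Mathlib
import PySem

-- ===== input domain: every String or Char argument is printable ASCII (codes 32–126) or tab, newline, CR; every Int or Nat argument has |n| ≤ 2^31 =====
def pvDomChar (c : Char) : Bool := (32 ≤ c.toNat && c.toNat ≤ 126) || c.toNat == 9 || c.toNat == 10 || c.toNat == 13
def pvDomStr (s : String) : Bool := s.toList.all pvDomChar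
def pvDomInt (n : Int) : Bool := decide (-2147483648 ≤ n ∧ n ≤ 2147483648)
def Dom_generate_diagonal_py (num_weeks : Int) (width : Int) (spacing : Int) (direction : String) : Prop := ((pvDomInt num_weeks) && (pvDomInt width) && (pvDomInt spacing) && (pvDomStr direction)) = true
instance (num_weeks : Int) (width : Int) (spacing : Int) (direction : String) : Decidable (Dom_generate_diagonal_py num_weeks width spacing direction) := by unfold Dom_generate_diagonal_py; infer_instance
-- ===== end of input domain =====

-- B precomputes the stripe profile along the diagonal-offset axis once and emits each
-- of the 7 rows as a slice of it, replacing A's per-cell modular test and in-place grid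
-- mutation (objective: faster; a timing run measured B faster at the largest size).

-- ===== PORT A =====
def generate_diagonal_py (num_weeks : Int) (width : Int) (spacing : Int) (direction : String) : List (List Bool) :=
  let grid : List (List Bool) := (List.range 7).map (fun _ => List.replicate num_weeks.toNat false)
  let period := width + spacing
  (PySem.List.pyRange 0 7 1).foldl (fun g r =>
    (PySem.List.pyRange 0 num_weeks 1).foldl (fun g c =>
      let offset := if direction = "down-right" then c + r else c - r
      if PySem.Int.mod offset period < width then
        PySem.List.pySetD g r (PySem.List.pySetD (PySem.List.pyGetD g r []) c true)
      else g) g) grid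

-- ===== PORT B =====
def generate_diagonal_py_alt (num_weeks : Int) (width : Int) (spacing : Int) (direction : String) : List (List Bool) :=
  if num_weeks ≤ 0 then (List.range 7).map (fun _ => ([] : List Bool))
  else
    let period := width + spacing
    -- stripe profile along the diagonal offset axis: offsets c+r / c-r lie in [-6, num_weeks+6]
    let diag : List Bool := (PySem.List.pyRange (-6) (num_weeks + 7) 1).map
      (fun i => decide (PySem.Int.mod i period < width))
    (PySem.List.pyRange 0 7 1).map (fun r =>
      if direction = "down-right" then PySem.List.slice diag (some (6 + r)) (some (6 + r + num_weeks))
      else PySem.List.slice diag (some (6 - r)) (some (6 - r + num_weeks)))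

-- ===== PRECONDITION & SPEC =====
-- Pre_ excludes exactly the inputs where A raises ZeroDivisionError: a positive number
-- of columns together with width + spacing = 0 (the modulus of the per-cell test).
def Pre_generate_diagonal_py (num_weeks : Int) (width : Int) (spacing : Int) (direction : String) : Prop :=
  num_weeks ≤ 0 ∨ width + spacing ≠ 0
instance (num_weeks : Int) (width : Int) (spacing : Int) (direction : String) : Decidable (Pre_generate_diagonal_py num_weeks width spacing direction) := by unfold Pre_generate_diagonal_py; infer_instance

def pvWitness_generate_diagonal_py : Int × Int × Int × String := (4, 2, 1, "down-right")

def Spec_generate_diagonal_py (num_weeks : Int) (width : Int) (spacing : Int) (direction : String) (out : List (List Bool)) : Prop := out = generate_diagonal_py_alt num_weeks width spacing direction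
instance (num_weeks : Int) (width : Int) (spacing : Int) (direction : String) (out : List (List Bool)) : Decidable (Spec_generate_diagonal_py num_weeks width spacing direction out) := by unfold Spec_generate_diagonal_py; infer_instance

-- ===== CLAIM (what is proved, stated in full; the proofs are below) =====
def Claim_equal_generate_diagonal_py : Prop := ∀ (num_weeks : Int) (width : Int) (spacing : Int) (direction : String), Dom_generate_diagonal_py num_weeks width spacing direction → Pre_generate_diagonal_py num_weeks width spacing direction → Spec_generate_diagonal_py num_weeks width spacing direction (generate_diagonal_py num_weeks width spacing direction)

-- ===== LEMMAS AND PROOFS =====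

-- any fold whose step preserves the length preserves the length
theorem pv_foldl_length {α β : Type} (f : List α → β → List α)
    (hf : ∀ g c, (f g c).length = g.length) (l : List β) (g : List α) :
    (l.foldl f g).length = g.length := by
  induction l generalizing g with
  | nil => rfl
  | cons c l ih => rw [List.foldl_cons, ih, hf]

-- element k of the inner c-loop's result (row view)
theorem pv_rowfold_getElem? (P : Int → Prop) [DecidablePred P] (l : List Int)
    (hl : ∀ c ∈ l, 0 ≤ c) (row : List Bool) (k : Nat) (hk : k < row.length) :
    (l.foldl (fun ro c => if P c then PySem.List.pySetD ro c true else ro) row)[k]? =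
      if (k : Int) ∈ l ∧ P (k : Int) then some true else row[k]? := by
  induction l generalizing row with
  | nil => simp
  | cons c l ih =>
    have hc : 0 ≤ c := hl c (by simp)
    have hl' : ∀ d ∈ l, 0 ≤ d := fun d hd => hl d (by simp [hd])
    simp only [List.foldl_cons]
    by_cases hPc : P c
    · rw [if_pos hPc, PySem.List.pySetD_of_nonneg row true hc,
        ih hl' _ (by simpa using hk)]
      have hset : (row.set c.toNat true)[k]? = if c.toNat = k then some true else row[k]? := by
        rw [List.getElem?_set]
        split <;> simp_all
      by_cases hmem : (k : Int) ∈ l ∧ P (k : Int)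
      · simp [hmem]
      · rw [if_neg hmem, hset]
        by_cases hck : c.toNat = k
        · have hce : c = (k : Int) := by omega
          subst hce
          simp_all
        · rw [if_neg hck]
          have hno : ¬ ((k : Int) ∈ c :: l ∧ P (k : Int)) := by
            rintro ⟨hm, hp⟩
            rcases List.mem_cons.mp hm with h1 | h1
            · exact hck (by omega)
            · exact hmem ⟨h1, hp⟩
          rw [if_neg hno]
    · rw [if_neg hPc, ih hl' _ hk]
      have hiff : ((k : Int) ∈ c :: l ∧ P (k : Int)) ↔ ((k : Int) ∈ l ∧ P (k : Int)) := by
        constructor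
        · rintro ⟨hm, hp⟩
          rcases List.mem_cons.mp hm with h1 | h1
          · exact absurd (h1 ▸ hp) hPc
          · exact ⟨h1, hp⟩
        · rintro ⟨hm, hp⟩; exact ⟨List.mem_cons_of_mem _ hm, hp⟩
      simp only [hiff]

-- A's inner c-loop, which mutates row r of the grid cell by cell, equals
-- fetching row r once, folding over it, and writing it back
theorem pv_inner_to_row (P : Int → Prop) [DecidablePred P] (lc : List Int)
    (r : Int) (hr0 : 0 ≤ r) (g : List (List Bool)) (hr : r < (g.length : Int)) :
    lc.foldl (fun g c => if P c then PySem.List.pySetD g r (PySem.List.pySetD (PySem.List.pyGetD g r []) c true) else g) g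
    = PySem.List.pySetD g r (lc.foldl (fun ro c => if P c then PySem.List.pySetD ro c true else ro) (PySem.List.pyGetD g r [])) := by
  induction lc generalizing g with
  | nil =>
    simp only [List.foldl_nil]
    rw [PySem.List.pySetD_of_nonneg g _ hr0, PySem.List.pyGetD_eq_getElem g [] hr0 (by simpa using hr)]
    have hnat : r.toNat < g.length := by omega
    exact (List.set_getElem_self hnat).symm
  | cons c lc ih =>
    simp only [List.foldl_cons]
    by_cases hPc : P c
    · simp only [if_pos hPc]
      set row := PySem.List.pyGetD g r [] with hrow
      set row' := PySem.List.pySetD row c true with hrow'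
      set g' := PySem.List.pySetD g r row' with hg'
      have hlen : g'.length = g.length := PySem.List.length_pySetD ..
      rw [ih g' (by rw [hlen]; exact hr)]
      have hget : PySem.List.pyGetD g' r [] = row' := by
        rw [hg', PySem.List.pySetD_of_nonneg g _ hr0, PySem.List.pyGetD_of_nonneg _ [] hr0]
        simp [List.getD_eq_getElem?_getD, show r.toNat < g.length by omega]
      rw [hget, hg', PySem.List.pySetD_of_nonneg g _ hr0,
        PySem.List.pySetD_of_nonneg (g.set r.toNat row') _ hr0, List.set_set,
        ← PySem.List.pySetD_of_nonneg g _ hr0]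
    · simp only [if_neg hPc]
      exact ih g hr

-- element k of A's whole double loop: row k of the initial grid, folded by the c-loop
theorem pv_gridfold_getElem? (P : Int → Int → Prop) [inst : ∀ r, DecidablePred (P r)]
    (lc : List Int) (lr : List Int)
    (hlr : ∀ r ∈ lr, 0 ≤ r) (hnd : lr.Nodup) (g : List (List Bool))
    (hrlen : ∀ r ∈ lr, r < (g.length : Int)) (k : Nat) (hk : k < g.length) :
    (lr.foldl (fun g r => lc.foldl (fun g c => if P r c then PySem.List.pySetD g r (PySem.List.pySetD (PySem.List.pyGetD g r []) c true) else g) g) g)[k]? =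
      if (k : Int) ∈ lr then
        (g[k]?).map (fun row => lc.foldl (fun ro c => if P (k : Int) c then PySem.List.pySetD ro c true else ro) row)
      else g[k]? := by
  induction lr generalizing g with
  | nil => simp
  | cons r lr ih =>
    have hr : 0 ≤ r := hlr r (by simp)
    have hrg : r < (g.length : Int) := hrlen r (by simp)
    have hlr' : ∀ d ∈ lr, 0 ≤ d := fun d hd => hlr d (by simp [hd])
    have hnd' : lr.Nodup := hnd.of_cons
    have hrl : r ∉ lr := (List.nodup_cons.mp hnd).1
    simp only [List.foldl_cons]
    rw [pv_inner_to_row (P r) lc r hr g hrg, PySem.List.pySetD_of_nonneg g _ hr]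
    rw [ih hlr' hnd' _ (by intro d hd; have := hrlen d (by simp [hd]); simpa using this)
      (by simpa using hk)]
    have hset : ∀ v : List Bool, (g.set r.toNat v)[k]? =
        if r.toNat = k then (if k < g.length then some v else none) else g[k]? := by
      intro v; rw [List.getElem?_set]; by_cases h : r.toNat = k <;> simp [h]
    by_cases hmem : (k : Int) ∈ lr
    · rw [if_pos hmem, if_pos (List.mem_cons_of_mem _ hmem)]
      have hrk : r.toNat ≠ k := by
        intro hkk
        exact hrl (by rwa [show (k:Int) = r by omega] at hmem)
      rw [hset, if_neg hrk]
    · rw [if_neg hmem, hset]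
      by_cases hrk : r.toNat = k
      · have hre : r = (k : Int) := by omega
        rw [if_pos hrk, if_pos (by simp [hre.symm] : (k:Int) ∈ r :: lr), if_pos hk]
        subst hre
        rw [PySem.List.pyGetD_eq_getElem g [] hr (by simpa using hk)]
        simp [List.getElem?_eq_getElem hk]
      · rw [if_neg hrk, if_neg ?_]
        rintro hm
        rcases List.mem_cons.mp hm with h1 | h1
        · exact hrk (by omega)
        · exact hmem h1

-- element j of a row slice of the diagonal profile
theorem pv_slice_diag_getElem? (P : Int → Bool) (nw a : Int) (h0 : 0 ≤ a) (h12 : a ≤ 12)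
    (hnw : 0 < nw) (j : Nat) :
    (PySem.List.slice ((PySem.List.pyRange (-6) (nw + 7) 1).map P) (some a) (some (a + nw)))[j]? =
      if (j : Int) < nw then some (P (a - 6 + j)) else none := by
  rw [PySem.List.slice_toNat _ h0 (by omega), List.getElem?_take]
  by_cases hj : (j : Int) < nw
  · rw [if_pos (by omega), if_pos hj, List.getElem?_drop, List.getElem?_map,
      PySem.List.getElem?_pyRange_one (-6) (nw + 7) (a.toNat + j),
      if_pos (by omega), Option.map_some]
    congr 2
    push_cast
    omega
  · rw [if_neg (by omega), if_neg hj]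

-- a conditional write of one row does not change the number of rows / cells
theorem pv_step_len {α : Type} (b : Prop) [Decidable b] (g : List α) (r : Int) (v : α) :
    (if b then PySem.List.pySetD g r v else g).length = g.length := by
  split <;> simp [PySem.List.length_pySetD]

-- ===== VERDICT (by name: the statement is the Claim_ definition above) =====
theorem generate_diagonal_py_spec : Claim_equal_generate_diagonal_py := by
  intro nw w s dir _ hpre
  unfold Spec_generate_diagonal_py
  simp only [generate_diagonal_py, generate_diagonal_py_alt]
  by_cases hnw : nw ≤ 0
  · rw [if_pos hnw, PySem.List.pyRange_one_eq_nil hnw]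
    simp only [List.foldl_nil]
    have hfix : ∀ (l : List Int) (g : List (List Bool)), l.foldl (fun g _ => g) g = g := by
      intro l
      induction l with
      | nil => intro g; rfl
      | cons x l ih => intro g; simp only [List.foldl_cons]; exact ih g
    rw [hfix]
    have h0 : nw.toNat = 0 := by omega
    simp [h0]
  · rw [if_neg hnw]
    have hnwpos : (0:Int) < nw := by omega
    have hper : w + s ≠ 0 := by cases hpre with | inl h => omega | inr h => exact h
    apply List.ext_getElem?
    intro k
    have hlenA : (List.foldl (fun g r =>
        List.foldl (fun g c =>
          if PySem.Int.mod (if dir = "down-right" then c + r else c - r) (w + s) < w then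
            PySem.List.pySetD g r (PySem.List.pySetD (PySem.List.pyGetD g r []) c true)
          else g) g (PySem.List.pyRange 0 nw 1))
        ((List.range 7).map (fun _ => List.replicate nw.toNat false)) (PySem.List.pyRange 0 7 1)).length = 7 := by
      rw [pv_foldl_length _ (fun g r => pv_foldl_length _ (fun g c => pv_step_len _ g _ _) _ g) _ _]
      simp
    by_cases h7 : k < 7
    · have hglen : ((List.range 7).map (fun _ : Nat => List.replicate nw.toNat false)).length = 7 := by simp
      rw [pv_gridfold_getElem? (fun r c => PySem.Int.mod (if dir = "down-right" then c + r else c - r) (w + s) < w)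
        (PySem.List.pyRange 0 nw 1) (PySem.List.pyRange 0 7 1)
        (fun r hr => (PySem.List.mem_pyRange_one.mp hr).1)
        (PySem.List.nodup_pyRange_one 0 7)
        ((List.range 7).map (fun _ : Nat => List.replicate nw.toNat false))
        (fun r hr => by
            have h2 := (PySem.List.mem_pyRange_one.mp hr).2
            rw [hglen]; exact_mod_cast h2)
        k (by rw [hglen]; exact h7)]
      rw [if_pos (PySem.List.mem_pyRange_one.mpr ⟨by omega, by omega⟩)]
      rw [List.getElem?_map, List.getElem?_map]
      rw [PySem.List.getElem?_pyRange_one 0 7 k, if_pos (by simpa using h7 : k < ((7:Int) - 0).toNat)]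
      simp only [List.getElem?_range, h7, Option.map_some, zero_add]
      congr 1
      by_cases hdir : dir = "down-right"
      · simp only [hdir, reduceIte]
        apply List.ext_getElem?
        intro j
        rw [pv_slice_diag_getElem? _ nw (6 + (k:Int)) (by omega) (by omega) hnwpos j]
        by_cases hj : j < nw.toNat
        · rw [pv_rowfold_getElem? _ _ (fun c hc => (PySem.List.mem_pyRange_one.mp hc).1)
            _ j (by simpa using hj), List.getElem?_replicate,
            if_pos (show (j:Int) < nw by omega)]
          have harg : (6:Int) + (k:Int) - 6 + (j:Int) = (j:Int) + (k:Int) := by ring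
          rw [harg]
          have hmem : ((j:Int)) ∈ PySem.List.pyRange 0 nw 1 :=
            PySem.List.mem_pyRange_one.mpr ⟨by omega, by omega⟩
          by_cases hP : PySem.Int.mod ((j:Int) + (k:Int)) (w + s) < w
          · rw [if_pos ⟨hmem, hP⟩]; simp [hP]
          · rw [if_neg (by rintro ⟨_, hp⟩; exact hP hp)]; simp [hP, hj]
        · rw [List.getElem?_eq_none
            (by rw [pv_foldl_length _ (fun ro c => pv_step_len _ ro _ _) _ _]; simp; omega),
            if_neg (by omega)]
      · simp only [hdir, reduceIte]
        apply List.ext_getElem?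
        intro j
        rw [pv_slice_diag_getElem? _ nw (6 - (k:Int)) (by omega) (by omega) hnwpos j]
        by_cases hj : j < nw.toNat
        · rw [pv_rowfold_getElem? _ _ (fun c hc => (PySem.List.mem_pyRange_one.mp hc).1)
            _ j (by simpa using hj), List.getElem?_replicate,
            if_pos (show (j:Int) < nw by omega)]
          have harg : (6:Int) - (k:Int) - 6 + (j:Int) = (j:Int) - (k:Int) := by ring
          rw [harg]
          have hmem : ((j:Int)) ∈ PySem.List.pyRange 0 nw 1 :=
            PySem.List.mem_pyRange_one.mpr ⟨by omega, by omega⟩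
          by_cases hP : PySem.Int.mod ((j:Int) - (k:Int)) (w + s) < w
          · rw [if_pos ⟨hmem, hP⟩]; simp [hP]
          · rw [if_neg (by rintro ⟨_, hp⟩; exact hP hp)]; simp [hP, hj]
        · rw [List.getElem?_eq_none
            (by rw [pv_foldl_length _ (fun ro c => pv_step_len _ ro _ _) _ _]; simp; omega),
            if_neg (by omega)]
    · rw [List.getElem?_eq_none (by rw [hlenA]; omega),
        List.getElem?_eq_none (by simp [PySem.List.length_pyRange_one]; omega)]
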